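-- pv_equiv track=rewrite | github.com/carlosalevela/Ali_back | test_grado_10_11/views.py | _ultima_pregunta
-- ===== SOURCE A (Python) =====
-- TOTAL_PREGUNTAS = 40
--
-- VALID_TEXT = {"Me encanta", "Me interesa", "No me gusta"}
--
-- MAP_A_B_C = {"A": "Me encanta", "B": "Me interesa", "C": "No me gusta"}  # D ya no existe
--
-- def _is_valida(r):
--     r = (r or "").strip()
--     return (r in VALID_TEXT) or (r in MAP_A_B_C and MAP_A_B_C[r] in VALID_TEXT)
--
-- def _ultima_pregunta(respuestas: dict) -> int:
--     if not isinstance(respuestas, dict):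
--         return 0
--     last = 0
--     for i in range(1, TOTAL_PREGUNTAS + 1):
--         if _is_valida(respuestas.get(f"pregunta_{i}", "")):
--             last = i
--     return last
-- ===== SOURCE B (Python) =====
-- TOTAL_PREGUNTAS = 40
--
-- VALID_TEXT = {"Me encanta", "Me interesa", "No me gusta"}
--
-- MAP_A_B_C = {"A": "Me encanta", "B": "Me interesa", "C": "No me gusta"}  # D ya no existe
--
-- def _is_valida(r):
--     r = (r or "").strip()
--     return (r in VALID_TEXT) or (r in MAP_A_B_C and MAP_A_B_C[r] in VALID_TEXT)
--
-- def _ultima_pregunta(respuestas: dict) -> int: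
--     if not isinstance(respuestas, dict):
--         return 0
--     for i in range(TOTAL_PREGUNTAS, 0, -1):
--         if _is_valida(respuestas.get(f"pregunta_{i}", "")):
--             return i
--     return 0
-- ===== Notes on version B (the rewrite author's own statement) =====
-- stated objective: alternative
-- what changed: Replaces the forward scan over all 40 questions with a last-seen accumulator by a reverse early-exit scan that returns the first valid index counting down from 40, maintaining no accumulator.
import Mathlib
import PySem

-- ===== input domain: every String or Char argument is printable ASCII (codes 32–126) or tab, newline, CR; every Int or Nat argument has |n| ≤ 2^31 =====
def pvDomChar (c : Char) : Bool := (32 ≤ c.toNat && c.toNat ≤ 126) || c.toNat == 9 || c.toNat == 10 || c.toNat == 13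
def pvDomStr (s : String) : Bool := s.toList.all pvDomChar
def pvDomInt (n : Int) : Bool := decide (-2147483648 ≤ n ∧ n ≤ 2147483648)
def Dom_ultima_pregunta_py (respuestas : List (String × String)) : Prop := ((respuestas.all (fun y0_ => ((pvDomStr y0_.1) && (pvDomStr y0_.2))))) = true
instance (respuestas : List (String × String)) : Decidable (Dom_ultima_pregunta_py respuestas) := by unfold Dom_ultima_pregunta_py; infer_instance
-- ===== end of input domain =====

-- B replaces A's forward scan-and-overwrite over all 40 questions by a reverse
-- early-exit scan (first valid index counting down from 40); alternative decomposition, same cost.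

-- ===== PORT A =====
-- module constants / helper, shared verbatim by both ports
def VALID_TEXT : List String := ["Me encanta", "Me interesa", "No me gusta"]

def MAP_A_B_C : PySem.Dict String String :=
  PySem.Dict.mk [("A", "Me encanta"), ("B", "Me interesa"), ("C", "No me gusta")]

def is_valida (r : String) : Bool :=
  let r := PySem.Str.strip r        -- (r or "").strip(): r is a String, '' behaves the same
  VALID_TEXT.contains r ||
    (MAP_A_B_C.contains r &&
      (match MAP_A_B_C.get? r with
       | some v => VALID_TEXT.contains v
       | none => false))

-- f"pregunta_{i}"
def preguntaKey (i : Int) : String := "pregunta_" ++ PySem.Int.toStr i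

-- in Lean respuestas is always an association list, so `isinstance(respuestas, dict)` holds
def ultima_pregunta_py (respuestas : List (String × String)) : Int :=
  (PySem.List.pyRange 1 (40 + 1) 1).foldl
    (fun last i =>
      if is_valida ((PySem.Dict.mk respuestas).getD (preguntaKey i) "") then i else last) 0

-- ===== PORT B =====
-- reverse loop 'for i in range(40, 0, -1): if valid: return i' as countdown recursion
def ultimaAltGo (respuestas : List (String × String)) : Nat → Int
  | 0 => 0
  | n + 1 =>
    if is_valida ((PySem.Dict.mk respuestas).getD (preguntaKey ((n + 1 : Nat) : Int)) "") then
      ((n + 1 : Nat) : Int)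
    else ultimaAltGo respuestas n

def ultima_pregunta_py_alt (respuestas : List (String × String)) : Int :=
  ultimaAltGo respuestas 40

-- ===== PRECONDITION & SPEC =====
def Spec_ultima_pregunta_py (respuestas : List (String × String)) (out : Int) : Prop := out = ultima_pregunta_py_alt respuestas
instance (respuestas : List (String × String)) (out : Int) : Decidable (Spec_ultima_pregunta_py respuestas out) := by unfold Spec_ultima_pregunta_py; infer_instance

-- ===== CLAIM (what is proved, stated in full; the proofs are below) =====
def Claim_equal_ultima_pregunta_py : Prop := ∀ (respuestas : List (String × String)), Dom_ultima_pregunta_py respuestas → Spec_ultima_pregunta_py respuestas (ultima_pregunta_py respuestas)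

-- ===== LEMMAS AND PROOFS =====

theorem foldl_eq_altGo (respuestas : List (String × String)) (n : Nat) :
    (PySem.List.pyRange 1 ((n : Int) + 1) 1).foldl
      (fun last i =>
        if is_valida ((PySem.Dict.mk respuestas).getD (preguntaKey i) "") then i else last) 0
    = ultimaAltGo respuestas n := by
  induction n with
  | zero => simp [PySem.List.pyRange_one_eq_nil, ultimaAltGo]
  | succ n ih =>
    have hc : ((n + 1 : Nat) : Int) = (n : Int) + 1 := by push_cast; ring
    rw [hc, PySem.List.pyRange_one_succ_right (by omega), List.foldl_append]
    simp only [List.foldl_cons, List.foldl_nil, ultimaAltGo, hc]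
    split_ifs with hv
    · rfl
    · exact ih

-- ===== VERDICT (by name: the statement is the Claim_ definition above) =====
theorem ultima_pregunta_py_spec : Claim_equal_ultima_pregunta_py := by
  intro respuestas _
  unfold Spec_ultima_pregunta_py ultima_pregunta_py ultima_pregunta_py_alt
  have h := foldl_eq_altGo respuestas 40
  simp only [Nat.cast_ofNat] at h
  exact h
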